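-- pv_equiv track=rewrite | github.com/stanfordnlp/stanza | stanza/models/ner_tagger.py | get_known_tags
-- ===== SOURCE A (Python) =====
-- def get_known_tags(tags):
--     """
--     Tags are stored in the dataset as a list of list of tags
--
--     This returns a sorted list for each column of tags in the dataset
--     """
--     max_columns = max(len(word) for sent in tags for word in sent)
--     known_tags = [set() for _ in range(max_columns)]
--     for sent in tags:
--         for word in sent:
--             for tag_idx, tag in enumerate(word):
--                 known_tags[tag_idx].add(tag)
--     return [sorted(x) for x in known_tags]
-- ===== SOURCE B (Python) =====
-- def get_known_tags(tags):
--     """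
--     Tags are stored in the dataset as a list of list of tags
--
--     This returns a sorted list for each column of tags in the dataset
--     """
--     words = [word for sent in tags for word in sent]
--     columns = []
--     rest = [word for word in words if word]
--     while rest:
--         columns.append(sorted({word[0] for word in rest}))
--         rest = [word[1:] for word in rest if len(word) > 1]
--     return columns
-- ===== Notes on version B (the rewrite author's own statement) =====
-- stated objective: alternative
-- what changed: Replaces A's row-major scheme (max-length pre-pass, pre-sized list of per-column sets filled by enumerating every tag of every word) with a column-major peeling loop: repeatedly take the set of first tags of the remaining words as the next column and cut those first tags off, with no index arithmetic and no pre-computed column count.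
import Mathlib
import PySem

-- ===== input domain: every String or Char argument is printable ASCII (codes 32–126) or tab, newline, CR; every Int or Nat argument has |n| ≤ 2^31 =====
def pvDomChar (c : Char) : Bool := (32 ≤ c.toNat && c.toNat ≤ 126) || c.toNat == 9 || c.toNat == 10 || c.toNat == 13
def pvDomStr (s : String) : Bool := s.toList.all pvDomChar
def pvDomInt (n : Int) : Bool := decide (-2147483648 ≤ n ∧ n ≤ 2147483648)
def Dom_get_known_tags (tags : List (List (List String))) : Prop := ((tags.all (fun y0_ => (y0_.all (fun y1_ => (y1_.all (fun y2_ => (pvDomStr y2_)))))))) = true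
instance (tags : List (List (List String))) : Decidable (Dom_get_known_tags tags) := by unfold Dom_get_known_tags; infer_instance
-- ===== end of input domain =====

-- B replaces A's row-major two-pass scheme (max-length pre-pass + pre-sized list of per-column
-- sets) by a column-major peeling loop over the words; objective: alternative (same cost).


-- ===== PORT A =====
-- known_tags[tag_idx] and the write-back are always in range (tag_idx < max_columns = len(known_tags)),
-- so the total pyGetD/pySetD forms are exact here.
def get_known_tags (tags : List (List (List String))) : List (List String) :=
  match PySem.List.max? (tags.flatMap (fun sent => sent.map (fun word => (word.length : Int)))) (fun x => x) with
  | none => []  -- Python's max() raises ValueError on the empty generator; excluded by Pre_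
  | some max_columns =>
    let init : List (PySem.Set String) := (PySem.List.pyRange 0 max_columns 1).map (fun _ => PySem.Set.empty)
    let known_tags := tags.foldl (fun k sent =>
        sent.foldl (fun k word =>
          (PySem.List.enumerate word).foldl (fun k p =>
            PySem.List.pySetD k p.1 (PySem.Set.add (PySem.List.pyGetD k p.1 PySem.Set.empty) p.2)) k) k) init
    known_tags.map (fun x => PySem.List.sorted x (fun y => y) false)

-- ===== PORT B =====
-- termination bound for the while loop's measure; cited by pvColsLoop's decreasing_by
theorem pvColsLoop_measure (rest : List (List String)) :
    ((((rest.filter (fun w => decide (1 < w.length))).map (fun w => w.drop 1)).map List.length).sum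
      + ((rest.filter (fun w => decide (1 < w.length))).map (fun w => w.drop 1)).length)
    ≤ (rest.map List.length).sum := by
  induction rest with
  | nil => simp
  | cons w ws ih =>
    by_cases h : 1 < w.length
    · simp only [List.filter_cons, h, decide_true, if_true, List.map_cons, List.sum_cons,
        List.length_cons, List.length_drop]
      omega
    · have h' : decide (1 < w.length) = false := by simp [h]
      simp only [List.filter_cons, h', Bool.false_eq_true, if_false, List.map_cons, List.sum_cons]
      omega

-- attach-elimination used by pvColsLoop's decreasing_by
theorem pv_attach_filter_map {α β : Type} (l : List α) (p : α → Bool) (f : α → β) :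
    (l.attach.filter (fun x => p x.1)).map (fun x => f x.1) = (l.filter p).map f := by
  simp

-- the while loop: each iteration emits the sorted set of first tags of the remaining
-- (all nonempty) words, then cuts those first tags off; word[0] is the total headD here
-- (rest holds only nonempty words on every call reached from get_known_tags_alt).
def pvColsLoop (rest : List (List String)) (acc : List (List String)) : List (List String) :=
  if rest = [] then acc
  else
    pvColsLoop ((rest.filter (fun w => decide (1 < w.length))).map (fun w => w.drop 1))
      (acc ++ [PySem.List.sorted (PySem.Set.ofList (rest.map (fun w => w.headD ""))) (fun y => y) false])
termination_by (rest.map List.length).sum + rest.length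
decreasing_by
  rw [pv_attach_filter_map rest (fun w => decide (1 < w.length)) (fun w => w.drop 1)]
  have h1 := pvColsLoop_measure rest
  have h2 : 1 ≤ rest.length := by
    cases rest with
    | nil => simp_all
    | cons a t => simp
  omega

def get_known_tags_alt (tags : List (List (List String))) : List (List String) :=
  let words := tags.flatMap (fun sent => sent)
  pvColsLoop (words.filter (fun w => !w.isEmpty)) []

-- ===== PRECONDITION & SPEC =====
-- Pre_ excludes exactly the inputs containing no words at all, where A's max() raises ValueError.
def Pre_get_known_tags (tags : List (List (List String))) : Prop :=
  tags.flatMap (fun s => s) ≠ []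
instance (tags : List (List (List String))) : Decidable (Pre_get_known_tags tags) := by unfold Pre_get_known_tags; infer_instance
def pvWitness_get_known_tags : List (List (List String)) := [[["B", "PER"], ["O"]]]

def Spec_get_known_tags (tags : List (List (List String))) (out : List (List String)) : Prop := out = get_known_tags_alt tags
instance (tags : List (List (List String))) (out : List (List String)) : Decidable (Spec_get_known_tags tags out) := by unfold Spec_get_known_tags; infer_instance

-- ===== CLAIM (what is proved, stated in full; the proofs are below) =====
def Claim_equal_get_known_tags : Prop := ∀ (tags : List (List (List String))), Dom_get_known_tags tags → Pre_get_known_tags tags → Spec_get_known_tags tags (get_known_tags tags)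

-- ===== LEMMAS AND PROOFS =====

-- the common specification both programs are reduced to:
-- column i is the set of i-th tags of the words long enough, in traversal order, sorted
def pvColTags (i : Nat) (words : List (List String)) : List String :=
  (words.filter (fun w => decide (i < w.length))).map (fun w => w.getD i "")
def pvMaxLen (words : List (List String)) : Nat := (words.map List.length).foldl max 0
def pvSpecCols (words : List (List String)) : List (List String) :=
  (List.range (pvMaxLen words)).map
    (fun i => PySem.List.sorted (PySem.Set.ofList (pvColTags i words)) (fun y => y) false)

theorem pv_foldl_max_le (l : List Nat) (a n : Nat) (ha : a ≤ n) (h : ∀ y ∈ l, y ≤ n) :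
    l.foldl max a ≤ n := by
  induction l generalizing a with
  | nil => exact ha
  | cons x t ih =>
    exact ih (max a x) (by have := h x (by simp); omega) (fun y hy => h y (by simp [hy]))

theorem pv_le_foldl_max (l : List Nat) (a : Nat) : a ≤ l.foldl max a ∧ ∀ y ∈ l, y ≤ l.foldl max a := by
  induction l generalizing a with
  | nil => exact ⟨le_refl a, by simp⟩
  | cons x t ih =>
    obtain ⟨h1, h2⟩ := ih (max a x)
    refine ⟨le_trans (Nat.le_max_left a x) h1, ?_⟩
    intro y hy
    rcases List.mem_cons.1 hy with rfl | hy
    · exact le_trans (Nat.le_max_right a y) h1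
    · exact h2 y hy

theorem pv_foldl_max_mem (l : List Nat) (a : Nat) : l.foldl max a = a ∨ l.foldl max a ∈ l := by
  induction l generalizing a with
  | nil => exact Or.inl rfl
  | cons x t ih =>
    rcases ih (max a x) with h | h
    · rcases max_choice a x with h2 | h2 <;> rw [List.foldl_cons, h, h2]
      · exact Or.inl rfl
      · exact Or.inr (by simp)
    · exact Or.inr (List.mem_cons_of_mem _ h)

theorem pv_maxLen_mem (words : List (List String)) (h : words ≠ []) :
    pvMaxLen words ∈ words.map List.length := by
  rcases pv_foldl_max_mem (words.map List.length) 0 with h0 | hm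
  · unfold pvMaxLen
    rw [h0]
    cases words with
    | nil => exact absurd rfl h
    | cons w ws =>
      have hle := (pv_le_foldl_max ((w :: ws).map List.length) 0).2 w.length (by simp)
      rw [h0] at hle
      simp only [List.map_cons, List.mem_cons]
      exact Or.inl (by omega)
  · exact hm

theorem pv_maxLen_ub (words : List (List String)) : ∀ w ∈ words, w.length ≤ pvMaxLen words := by
  intro w hw
  exact (pv_le_foldl_max (words.map List.length) 0).2 w.length (List.mem_map_of_mem hw)


-- B1: dropping empty words changes no column
theorem pv_colTags_filter (i : Nat) (words : List (List String)) :
    pvColTags i (words.filter (fun w => !w.isEmpty)) = pvColTags i words := by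
  unfold pvColTags
  rw [List.filter_filter]
  congr 1
  apply List.filter_congr
  intro w _
  by_cases h : i < w.length
  · have h2 : w.isEmpty = false := by
      cases w with | nil => simp at h | cons a t => rfl
    simp [h, h2]
  · simp [h]

-- B2: dropping empty words does not change the column count
theorem pv_foldl_max_filter (words : List (List String)) (a : Nat) :
    ((words.filter (fun w => !w.isEmpty)).map List.length).foldl max a
      = (words.map List.length).foldl max a := by
  induction words generalizing a with
  | nil => rfl
  | cons w ws ih =>
    cases w with
    | nil => simp [ih]
    | cons x t => simp [ih]

theorem pv_maxLen_filter (words : List (List String)) :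
    pvMaxLen (words.filter (fun w => !w.isEmpty)) = pvMaxLen words :=
  pv_foldl_max_filter words 0

-- B3: column i of the peeled words is column i+1 of the words
theorem pv_colTags_shift (i : Nat) (rest : List (List String)) :
    pvColTags i ((rest.filter (fun w => decide (1 < w.length))).map (fun w => w.drop 1))
      = pvColTags (i + 1) rest := by
  unfold pvColTags
  rw [List.filter_map, List.map_map, List.filter_filter]
  congr 1
  · funext w
    simp [Function.comp, List.getD_eq_getElem?_getD]
  · apply List.filter_congr
    intro w _
    by_cases h : i + 1 < w.length
    · simp only [Function.comp, List.length_drop]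
      simp [show i < w.length - 1 by omega, show 1 < w.length by omega, h]
    · simp only [Function.comp, List.length_drop]
      simp [show ¬(i < w.length - 1) by omega, h]

-- B4: peeling removes exactly one column
theorem pv_maxLen_shift (rest : List (List String)) (hne : rest ≠ []) (hall : ∀ w ∈ rest, w ≠ []) :
    pvMaxLen ((rest.filter (fun w => decide (1 < w.length))).map (fun w => w.drop 1)) + 1
      = pvMaxLen rest := by
  set tails := (rest.filter (fun w => decide (1 < w.length))).map (fun w => w.drop 1) with htails
  have hM1 : 1 ≤ pvMaxLen rest := by
    cases rest with
    | nil => exact absurd rfl hne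
    | cons w ws =>
      have := pv_maxLen_ub (w :: ws) w (by simp)
      have hw := hall w (by simp)
      have : 1 ≤ w.length := by cases w with | nil => exact absurd rfl hw | cons a t => simp
      have := pv_maxLen_ub (w :: ws) w (by simp)
      omega
  have hub : ∀ y ∈ tails.map List.length, y ≤ pvMaxLen rest - 1 := by
    intro y hy
    rw [htails, List.map_map] at hy
    obtain ⟨w, hw, hwy⟩ := List.mem_map.1 hy
    have hw' := List.mem_filter.1 hw
    have := pv_maxLen_ub rest w hw'.1
    simp only [Function.comp, List.length_drop] at hwy
    omega
  have hle : pvMaxLen tails ≤ pvMaxLen rest - 1 := pv_foldl_max_le (tails.map List.length) 0 (pvMaxLen rest - 1) (by omega) hub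
  by_cases hM2 : pvMaxLen rest = 1
  · -- no word is longer than 1: tails is empty
    have : tails = [] := by
      rw [htails, List.map_eq_nil_iff, List.filter_eq_nil_iff]
      intro w hw
      have := pv_maxLen_ub rest w hw
      simp; omega
    rw [this]
    simpa [pvMaxLen] using hM2.symm
  · -- a word of maximal length M > 1 yields a tail of length M - 1
    obtain ⟨w0, hw0, hw0len⟩ := List.mem_map.1 (pv_maxLen_mem rest hne)
    have hw0f : w0 ∈ rest.filter (fun w => decide (1 < w.length)) :=
      List.mem_filter.2 ⟨hw0, by simp; omega⟩
    have hmem : pvMaxLen rest - 1 ∈ tails.map List.length := by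
      rw [htails, List.map_map]
      exact List.mem_map.2 ⟨w0, hw0f, by simp [Function.comp]; omega⟩
    have hge : pvMaxLen rest - 1 ≤ pvMaxLen tails :=
      (pv_le_foldl_max (tails.map List.length) 0).2 _ hmem
    omega

-- B5: one unfolding of the specification
theorem pv_specCols_cons (rest : List (List String)) (hne : rest ≠ []) (hall : ∀ w ∈ rest, w ≠ []) :
    pvSpecCols rest
      = PySem.List.sorted (PySem.Set.ofList (rest.map (fun w => w.headD ""))) (fun y => y) false
        :: pvSpecCols ((rest.filter (fun w => decide (1 < w.length))).map (fun w => w.drop 1)) := by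
  have hshift := pv_maxLen_shift rest hne hall
  have hhead : pvColTags 0 rest = rest.map (fun w => w.headD "") := by
    unfold pvColTags
    have : rest.filter (fun w => decide (0 < w.length)) = rest := by
      rw [List.filter_eq_self]
      intro w hw
      have := hall w hw
      cases w with | nil => exact absurd rfl this | cons a t => simp
    rw [this]
    apply List.map_congr_left
    intro w _
    cases w with | nil => rfl | cons a t => rfl
  unfold pvSpecCols
  rw [← hshift, List.range_succ_eq_map, List.map_cons, hhead, List.map_map]
  congr 1
  apply List.map_congr_left
  intro i _
  simp only [Function.comp]
  rw [pv_colTags_shift]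

-- B6: the loop computes the specification
theorem pv_colsLoop_spec_aux (n : Nat) :
    ∀ (rest acc : List (List String)), (rest.map List.length).sum + rest.length ≤ n →
      (∀ w ∈ rest, w ≠ []) → pvColsLoop rest acc = acc ++ pvSpecCols rest := by
  induction n with
  | zero =>
    intro rest acc hn _
    have : rest = [] := by cases rest with | nil => rfl | cons a t => simp at hn
    subst this
    simp [pvColsLoop, pvSpecCols, pvMaxLen]
  | succ n ih =>
    intro rest acc hn hall
    by_cases hne : rest = []
    · subst hne
      simp [pvColsLoop, pvSpecCols, pvMaxLen]
    · rw [pvColsLoop, if_neg hne]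
      have hlen : 1 ≤ rest.length := by
        cases rest with | nil => exact absurd rfl hne | cons a t => simp
      have hmeas := pvColsLoop_measure rest
      rw [ih _ _ (by omega) ?_, pv_specCols_cons rest hne hall, List.append_assoc]
      · rfl
      · intro w hw
        obtain ⟨w0, hw0, rfl⟩ := List.mem_map.1 hw
        have h1 := (List.mem_filter.1 hw0).2
        intro hnil
        have h2 : (List.drop 1 w0).length = 0 := by rw [hnil]; rfl
        rw [List.length_drop] at h2
        simp at h1; omega

theorem pv_colsLoop_spec (rest acc : List (List String)) (hall : ∀ w ∈ rest, w ≠ []) :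
    pvColsLoop rest acc = acc ++ pvSpecCols rest :=
  pv_colsLoop_spec_aux ((rest.map List.length).sum + rest.length) rest acc (le_refl _) hall


-- B: the loop computes the specification
theorem pvB_spec (tags : List (List (List String))) :
    get_known_tags_alt tags = pvSpecCols (tags.flatMap (fun s => s)) := by
  unfold get_known_tags_alt
  rw [pv_colsLoop_spec _ [] ?_]
  · rw [List.nil_append]
    unfold pvSpecCols
    rw [pv_maxLen_filter]
    apply List.map_congr_left
    intro i _
    rw [pv_colTags_filter]
  · intro w hw
    have := (List.mem_filter.1 hw).2
    simpa [List.isEmpty_iff] using this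

-- the flattened stream of (column index, tag) pairs A's triple loop traverses
def pvPairs (tags : List (List (List String))) : List (Int × String) :=
  (tags.flatMap (fun s => s)).flatMap (fun w => PySem.List.enumerate w)

theorem pv_flattenA (tags : List (List (List String))) (init : List (PySem.Set String)) :
    tags.foldl (fun k sent =>
        sent.foldl (fun k word =>
          (PySem.List.enumerate word).foldl (fun k p =>
            PySem.List.pySetD k p.1 (PySem.Set.add (PySem.List.pyGetD k p.1 PySem.Set.empty) p.2)) k) k) init
    = (pvPairs tags).foldl (fun k p =>
        PySem.List.pySetD k p.1 (PySem.Set.add (PySem.List.pyGetD k p.1 PySem.Set.empty) p.2)) init := by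
  simp only [pvPairs, List.foldl_flatMap]

theorem pv_max_id_eq (xs : List Int) (m : Int) (hm : m ∈ xs) (hmax : ∀ y ∈ xs, y ≤ m) :
    PySem.List.max? xs (fun x => x) = some m := by
  cases h : PySem.List.max? xs (fun x => x) with
  | none => exact absurd ((PySem.List.max?_eq_none_iff xs _).1 h ▸ hm) (List.not_mem_nil)
  | some m' =>
    have h1 : m ≤ m' := PySem.List.max?_isMax h m hm
    have h2 : m' ≤ m := hmax _ (PySem.List.max?_mem h)
    exact congrArg some (le_antisymm h2 h1)

theorem pv_setD_in (xs : List (PySem.Set String)) (i : Int) (v : PySem.Set String)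
    (h0 : 0 ≤ i) (h1 : i < (xs.length : Int)) :
    PySem.List.pySetD xs i v = xs.set i.toNat v := by
  lift i to ℕ using h0
  have : i < xs.length := by exact_mod_cast h1
  simp [PySem.List.pySetD, PySem.List.pySet?_natCast xs i v this]

-- bound on the pair indices
theorem pv_pairs_bound (tags : List (List (List String))) (p : Int × String)
    (hp : p ∈ pvPairs tags) :
    ∃ w ∈ tags.flatMap (fun s => s), 0 ≤ p.1 ∧ p.1 < (w.length : Int) := by
  obtain ⟨w, hw, hpw⟩ := List.mem_flatMap.1 hp
  refine ⟨w, hw, ?_⟩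
  obtain ⟨k, hk, rfl⟩ := (PySem.List.mem_enumerate_iff _ _ _).1 hpw
  simp
  omega

-- A's loop invariant: entry i of the list of sets accumulates exactly the tags with index i
theorem pv_invA (ps : List (Int × String)) :
    ∀ (k : List (PySem.Set String)),
    (∀ p ∈ ps, 0 ≤ p.1 ∧ p.1 < (k.length : Int)) →
    ((ps.foldl (fun k p =>
        PySem.List.pySetD k p.1 (PySem.Set.add (PySem.List.pyGetD k p.1 PySem.Set.empty) p.2)) k).length = k.length
    ∧ ∀ (i : Nat), i < k.length →
      PySem.List.pyGetD (ps.foldl (fun k p =>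
          PySem.List.pySetD k p.1 (PySem.Set.add (PySem.List.pyGetD k p.1 PySem.Set.empty) p.2)) k) (i : Int) PySem.Set.empty
        = ((ps.filter (fun p => decide (p.1 = (i : Int)))).map Prod.snd).foldl PySem.Set.add
            (PySem.List.pyGetD k (i : Int) PySem.Set.empty)) := by
  induction ps with
  | nil => intro k _; exact ⟨rfl, fun i _ => rfl⟩
  | cons p ps ih =>
    intro k hb
    have hp := hb p (List.mem_cons_self)
    have hset := pv_setD_in k p.1 (PySem.Set.add (PySem.List.pyGetD k p.1 PySem.Set.empty) p.2) hp.1 hp.2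
    simp only [List.foldl_cons]
    obtain ⟨ihl, ihp⟩ := ih (PySem.List.pySetD k p.1 (PySem.Set.add (PySem.List.pyGetD k p.1 PySem.Set.empty) p.2))
      (by intro q hq
          have := hb q (List.mem_cons_of_mem _ hq)
          rwa [hset, List.length_set])
    constructor
    · rw [ihl, hset, List.length_set]
    · intro i hi
      have hilen : i < (PySem.List.pySetD k p.1 (PySem.Set.add (PySem.List.pyGetD k p.1 PySem.Set.empty) p.2)).length := by
        rw [hset, List.length_set]; exact hi
      rw [ihp i hilen, List.filter_cons]
      by_cases hpi : p.1 = (i : Int)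
      · have hd : decide (p.1 = (i : Int)) = true := by simp [hpi]
        have hnt : p.1.toNat = i := by omega
        rw [hd, if_pos rfl, List.map_cons, List.foldl_cons]
        congr 1
        rw [hset, hnt, PySem.List.pyGetD_natCast, List.getD_eq_getElem?_getD,
            List.getElem?_set_self hi, Option.getD_some, hpi]
      · have hd : decide (p.1 = (i : Int)) = false := by simp [hpi]
        rw [hd, if_neg (by simp)]
        congr 1
        have hnt : p.1.toNat ≠ i := by omega
        rw [hset, PySem.List.pyGetD_natCast, PySem.List.pyGetD_natCast,
            List.getD_eq_getElem?_getD, List.getD_eq_getElem?_getD,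
            List.getElem?_set_ne hnt]

theorem pv_filter_eq_singleton (l : List Int) (hnd : l.Nodup) (i : Int) :
    l.filter (fun x => decide (x = i)) = if i ∈ l then [i] else [] := by
  induction l with
  | nil => rfl
  | cons x t ih =>
    rcases List.nodup_cons.1 hnd with ⟨hx, hnd'⟩
    rw [List.filter_cons]
    by_cases hxi : x = i
    · subst hxi
      simp only [decide_true, List.mem_cons, true_or, if_true]
      rw [ih hnd', if_neg hx]
    · have : decide (x = i) = false := by simp [hxi]
      rw [this, if_neg (by simp), ih hnd']
      by_cases hti : i ∈ t
      · simp [hti, Ne.symm hxi]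
      · simp [hti, Ne.symm hxi]

-- one word's contribution to column i
theorem pv_enum_filter (w : List String) (i : Nat) :
    ((PySem.List.enumerate w).filter (fun p => decide (p.1 = (i : Int)))).map Prod.snd
      = if i < w.length then [w.getD i ""] else [] := by
  rw [PySem.List.enumerate_eq_map_pyRange w "", List.filter_map]
  have hp : ((fun p : Int × String => decide (p.1 = (i : Int))) ∘ fun j => (j, PySem.List.pyGetD w j ""))
      = fun j => decide (j = (i : Int)) := rfl
  rw [hp, pv_filter_eq_singleton _ (PySem.List.nodup_pyRange_one _ _) _]
  by_cases h : i < w.length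
  · have hmem : (i : Int) ∈ PySem.List.pyRange 0 (PySem.List.len w) := by
      rw [PySem.List.mem_pyRange_one, PySem.List.len_eq]
      exact ⟨Int.natCast_nonneg i, by exact_mod_cast h⟩
    rw [if_pos hmem, if_pos h, List.map_map]
    simp only [List.map_cons, List.map_nil, Function.comp]
    rw [PySem.List.pyGetD_natCast]
  · have hmem : ¬ (i : Int) ∈ PySem.List.pyRange 0 (PySem.List.len w) := by
      rw [PySem.List.mem_pyRange_one, PySem.List.len_eq]
      intro hc
      exact h (by exact_mod_cast hc.2)
    rw [if_neg hmem, if_neg h, List.map_nil, List.map_nil]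

-- all contributions to column i across the words, in traversal order
theorem pv_filter_pairs (words : List (List String)) (i : Nat) :
    ((words.flatMap (fun w => PySem.List.enumerate w)).filter (fun p => decide (p.1 = (i : Int)))).map Prod.snd
      = pvColTags i words := by
  induction words with
  | nil => rfl
  | cons w ws ih =>
    rw [List.flatMap_cons, List.filter_append, List.map_append, pv_enum_filter, ih]
    unfold pvColTags
    rw [List.filter_cons]
    by_cases h : i < w.length
    · simp [h]
    · have hd : decide (i < w.length) = false := by simp [h]
      rw [hd]
      simp
      omega

theorem pvA_spec (tags : List (List (List String))) (hpre : tags.flatMap (fun s => s) ≠ []) :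
    get_known_tags tags = pvSpecCols (tags.flatMap (fun s => s)) := by
  have hstream : tags.flatMap (fun sent => sent.map (fun word => (word.length : Int)))
      = (tags.flatMap (fun s => s)).map (fun w => (w.length : Int)) := by
    rw [List.map_flatMap]
  have hMmem : ((pvMaxLen (tags.flatMap (fun s => s)) : Nat) : Int)
      ∈ (tags.flatMap (fun s => s)).map (fun w => (w.length : Int)) := by
    obtain ⟨w0, hw0, hlen⟩ := List.mem_map.1 (pv_maxLen_mem _ hpre)
    exact List.mem_map.2 ⟨w0, hw0, by rw [hlen]⟩
  have hMub : ∀ y ∈ (tags.flatMap (fun s => s)).map (fun w => (w.length : Int)),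
      y ≤ ((pvMaxLen (tags.flatMap (fun s => s)) : Nat) : Int) := by
    intro y hy
    obtain ⟨w, hw, rfl⟩ := List.mem_map.1 hy
    exact_mod_cast pv_maxLen_ub _ w hw
  have hmax := pv_max_id_eq _ _ hMmem hMub
  unfold get_known_tags
  rw [hstream, hmax]
  simp only []
  rw [pv_flattenA]
  set M : Int := ((pvMaxLen (tags.flatMap (fun s => s)) : Nat) : Int) with hM
  set init : List (PySem.Set String) := (PySem.List.pyRange 0 M 1).map (fun _ => PySem.Set.empty) with hinit
  have hinitlen : init.length = pvMaxLen (tags.flatMap (fun s => s)) := by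
    rw [hinit, List.length_map, PySem.List.length_pyRange_one]
    omega
  have hbound : ∀ p ∈ pvPairs tags, 0 ≤ p.1 ∧ p.1 < (init.length : Int) := by
    intro p hp
    obtain ⟨w, hw, h0, h1⟩ := pv_pairs_bound tags p hp
    refine ⟨h0, lt_of_lt_of_le h1 ?_⟩
    rw [hinitlen]
    exact_mod_cast pv_maxLen_ub _ w hw
  obtain ⟨hklen, hkpt⟩ := pv_invA (pvPairs tags) init hbound
  set kfin := (pvPairs tags).foldl (fun k p =>
      PySem.List.pySetD k p.1 (PySem.Set.add (PySem.List.pyGetD k p.1 PySem.Set.empty) p.2)) init with hkfin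
  have hkfin_eq : kfin = (PySem.List.pyRange 0 ((kfin.length : Nat) : Int) 1).map
      (fun j => PySem.List.pyGetD kfin j PySem.Set.empty) :=
    (PySem.List.map_pyGetD_pyRange_zero' kfin PySem.Set.empty).symm
  conv_lhs => rw [hkfin_eq]
  rw [List.map_map, hklen, hinitlen, PySem.List.pyRange_one, List.map_map]
  unfold pvSpecCols
  have hrange : ((((pvMaxLen (tags.flatMap (fun s => s)) : Nat) : Int) - 0).toNat)
      = pvMaxLen (tags.flatMap (fun s => s)) := by omega
  rw [hrange]
  apply List.map_congr_left
  intro k hk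
  rw [List.mem_range] at hk
  simp only [Function.comp]
  congr 1
  have hkin : k < init.length := by omega
  rw [zero_add, hkpt k hkin]
  have hinit_entry : PySem.List.pyGetD init ((k : Nat) : Int) PySem.Set.empty = PySem.Set.empty := by
    rw [hinit]
    exact PySem.List.pyGetD_map_pyRange_of_nonneg _ M _ _ (Int.natCast_nonneg k) (by omega)
  rw [hinit_entry, show (PySem.Set.empty : PySem.Set String) = [] from rfl,
      ← PySem.Set.ofList_eq_foldl]
  congr 1
  exact pv_filter_pairs (tags.flatMap (fun s => s)) k

-- ===== VERDICT (by name: the statement is the Claim_ definition above) =====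
theorem get_known_tags_spec : Claim_equal_get_known_tags := by
  intro tags _ hpre
  unfold Spec_get_known_tags
  rw [pvA_spec tags hpre, pvB_spec tags]
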